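-- pv_equiv track=rewrite | github.com/ifmylove2011/student | algorithm/greedy.py | find_best_candidate_set
-- ===== SOURCE A (Python) =====
-- def find_best_candidate_set(dict_nums, nums):
--     """
--     选出当前所有集合中，可得到最多‘可用’数字的一个集合(key)
--     :param dict_nums: 待筛选的集合字典
--     :param nums: 用于筛选的数字集合
--     :return: 筛选出的key
--     """
--     best_coverd = set()  # 最佳的数字集合
--     best_coverd_key = None  # 最佳的集合所对应的key
--     for k, v in dict_nums.items():
--         temp_coverd = nums & v  # 当前此集合能得到的数字集合
--         if len(temp_coverd) > len(best_coverd):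
--             best_coverd = temp_coverd
--             best_coverd_key = k
--     return best_coverd_key
-- ===== SOURCE B (Python) =====
-- def find_best_candidate_set(dict_nums, nums):
--     # Inverted index: element -> list of keys whose set contains it; then count
--     # coverage per key by scanning nums once, and take the first strict maximum.
--     index = {}
--     for k, v in dict_nums.items():
--         for x in v:
--             index.setdefault(x, []).append(k)
--     coverage = {k: 0 for k in dict_nums}
--     for x in nums:
--         for k in index.get(x, ()):
--             coverage[k] += 1
--     best_key = None
--     best_count = 0
--     for k in dict_nums:
--         c = coverage[k]
--         if c > best_count:
--             best_count = c
--             best_key = k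
--     return best_key
-- ===== Notes on version B (the rewrite author's own statement) =====
-- stated objective: alternative
-- what changed: Instead of building a set intersection per key, B builds an inverted index (element -> keys) in one pass over dict_nums, counts coverage per key in one pass over nums, and takes the first strict maximum in dict order.
import Mathlib
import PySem

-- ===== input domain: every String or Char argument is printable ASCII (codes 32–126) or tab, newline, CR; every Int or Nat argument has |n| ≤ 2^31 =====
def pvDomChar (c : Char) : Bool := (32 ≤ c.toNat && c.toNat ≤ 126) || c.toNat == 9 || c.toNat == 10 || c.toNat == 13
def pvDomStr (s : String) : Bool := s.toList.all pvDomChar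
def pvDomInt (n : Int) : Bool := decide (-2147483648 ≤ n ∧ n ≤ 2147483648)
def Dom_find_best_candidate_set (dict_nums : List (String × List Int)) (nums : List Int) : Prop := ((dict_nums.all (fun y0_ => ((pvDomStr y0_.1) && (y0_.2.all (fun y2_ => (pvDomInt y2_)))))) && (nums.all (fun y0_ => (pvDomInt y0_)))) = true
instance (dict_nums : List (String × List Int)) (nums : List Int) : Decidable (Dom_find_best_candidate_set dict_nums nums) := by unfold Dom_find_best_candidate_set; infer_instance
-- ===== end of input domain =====

-- B replaces the per-key set intersections with an inverted index (element -> keys)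
-- and one counting pass over nums (objective: alternative decomposition, same result).

-- ===== PORT A =====
-- nums and the dict values are Python sets, here lists of distinct elements (Pre_);
-- 'nums & v' is PySem.Set.inter; 'PySem.Set.ofList nums' keeps the Set invariant and
-- equals nums under Pre_ (nums has no duplicates).
def find_best_candidate_set (dict_nums : List (String × List Int)) (nums : List Int) : Option String :=
  (dict_nums.foldl
    (fun (st : List Int × Option String) kv =>
      let temp_coverd := PySem.Set.inter (PySem.Set.ofList nums) kv.2
      if temp_coverd.length > st.1.length then (temp_coverd, some kv.1) else st)
    ([], none)).2

-- ===== PORT B =====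
-- index = {}; for k, v in dict_nums.items(): for x in v: index.setdefault(x, []).append(k)
def fbcs_index (dict_nums : List (String × List Int)) : PySem.Dict Int (List String) :=
  dict_nums.foldl
    (fun d kv => kv.2.foldl (fun d x => d.modify x [] (fun l => l ++ [kv.1])) d)
    PySem.Dict.empty

-- coverage = {k: 0 for k in dict_nums}; for x in nums: for k in index.get(x, ()): coverage[k] += 1
-- ('coverage[k] += 1' is modify with default 0: every k in an index entry is a dict key,
--  so the KeyError branch is unreachable in the Python)
def fbcs_coverage (dict_nums : List (String × List Int)) (nums : List Int) : PySem.Dict String Int :=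
  nums.foldl
    (fun d x => ((fbcs_index dict_nums).getD x []).foldl (fun d k => d.modify k 0 (· + 1)) d)
    (dict_nums.foldl (fun d kv => d.insert kv.1 (0 : Int)) PySem.Dict.empty)

-- final scan: first key whose coverage strictly exceeds the running best (start 0/None);
-- 'coverage[k]' is getD 0: every dict key is a coverage key, KeyError unreachable
def find_best_candidate_set_alt (dict_nums : List (String × List Int)) (nums : List Int) : Option String :=
  (dict_nums.foldl
    (fun (st : Option String × Int) kv =>
      let c := (fbcs_coverage dict_nums nums).getD kv.1 0
      if c > st.2 then (some kv.1, c) else st)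
    (none, 0)).1

-- ===== PRECONDITION & SPEC =====
-- Pre_ is the representation invariant of the Python argument types (dict[str, set[int]],
-- set[int]): distinct dict keys and distinct elements in nums and in each value set.
-- It excludes no input the Python A accepts.
def Pre_find_best_candidate_set (dict_nums : List (String × List Int)) (nums : List Int) : Prop :=
  nums.Nodup ∧ (dict_nums.map Prod.fst).Nodup ∧ ∀ kv ∈ dict_nums, kv.2.Nodup
instance (dict_nums : List (String × List Int)) (nums : List Int) : Decidable (Pre_find_best_candidate_set dict_nums nums) := by unfold Pre_find_best_candidate_set; infer_instance

def pvWitness_find_best_candidate_set : (List (String × List Int)) × List Int :=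
  ([("a", [1, 2]), ("b", [2, 3, 4])], [2, 3])

def Spec_find_best_candidate_set (dict_nums : List (String × List Int)) (nums : List Int) (out : Option String) : Prop := out = find_best_candidate_set_alt dict_nums nums
instance (dict_nums : List (String × List Int)) (nums : List Int) (out : Option String) : Decidable (Spec_find_best_candidate_set dict_nums nums out) := by unfold Spec_find_best_candidate_set; infer_instance

-- ===== CLAIM (what is proved, stated in full; the proofs are below) =====
def Claim_equal_find_best_candidate_set : Prop := ∀ (dict_nums : List (String × List Int)) (nums : List Int), Dom_find_best_candidate_set dict_nums nums → Pre_find_best_candidate_set dict_nums nums → Spec_find_best_candidate_set dict_nums nums (find_best_candidate_set dict_nums nums)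

-- ===== LEMMAS AND PROOFS =====

-- the index build, flattened to a single fold over (element, key) pairs
theorem fbcs_index_eq_flat (dict_nums : List (String × List Int)) :
    fbcs_index dict_nums
      = (dict_nums.flatMap (fun kv => kv.2.map (fun x => (x, kv.1)))).foldl
          (fun d p => d.modify p.1 [] (fun l => l ++ [p.2])) PySem.Dict.empty := by
  unfold fbcs_index
  generalize (PySem.Dict.empty : PySem.Dict Int (List String)) = d
  induction dict_nums generalizing d with
  | nil => rfl
  | cons kv rest ih =>
    simp only [List.foldl_cons, List.flatMap_cons, List.foldl_append, List.foldl_map, ih]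

theorem fbcs_index_getD (dict_nums : List (String × List Int)) (x : Int) :
    (fbcs_index dict_nums).getD x []
      = ((dict_nums.flatMap (fun kv => kv.2.map (fun y => (y, kv.1)))).filter
          (fun p => p.1 == x)).map (fun p => p.2) := by
  rw [fbcs_index_eq_flat, PySem.Dict.getD_foldl_modify_append, PySem.Dict.getD_empty]
  simp

-- count of key k in the index entry for x, as a sum over the dict blocks
theorem fbcs_index_count (dict_nums : List (String × List Int)) (x : Int) (k : String) :
    ((fbcs_index dict_nums).getD x []).count k
      = (dict_nums.map (fun kv => if kv.1 = k then kv.2.count x else 0)).sum := by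
  rw [fbcs_index_getD]
  induction dict_nums with
  | nil => simp
  | cons kv rest ih =>
    simp only [List.flatMap_cons, List.filter_append, List.map_append, List.count_append,
      List.map_cons, List.sum_cons, ih]
    congr 1
    rw [List.filter_map, List.map_map]
    have hcomp : ((fun p : Int × String => p.2) ∘ fun y => (y, kv.1)) = fun _ => kv.1 := rfl
    rw [hcomp]
    by_cases hk : kv.1 = k
    · subst hk
      simp [List.map_const', List.count, List.countP_eq_length_filter, Function.comp_def]
    · simp only [hk, if_false]
      simp [List.map_const', List.count_replicate, hk]

-- with distinct keys, that sum collapses to the count in k's own value set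
theorem sum_blocks_of_nodup (l : List (String × List Int)) (k : String) (v : List Int) (x : Int)
    (hnd : (l.map Prod.fst).Nodup) (hmem : (k, v) ∈ l) :
    (l.map (fun kv => if kv.1 = k then kv.2.count x else 0)).sum = v.count x := by
  induction l with
  | nil => cases hmem
  | cons kv rest ih =>
    simp only [List.map_cons, List.nodup_cons] at hnd
    simp only [List.map_cons, List.sum_cons]
    rcases List.mem_cons.mp hmem with heq | htail
    · cases heq
      have hz : (rest.map (fun kv => if kv.1 = k then kv.2.count x else 0)).sum = 0 := by
        apply List.sum_eq_zero
        intro a ha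
        rcases List.mem_map.mp ha with ⟨kv', hkv', rfl⟩
        have : kv'.1 ≠ k := by
          intro h; exact hnd.1 (List.mem_map.mpr ⟨kv', hkv', h⟩)
        simp [this]
      simp [hz]
    · have hne : kv.1 ≠ k := by
        intro h
        exact hnd.1 (List.mem_map.mpr ⟨(k, v), htail, h.symm ▸ rfl⟩)
      simp [hne, ih hnd.2 htail]

-- baseline dict of zeros: every lookup with default 0 is 0
theorem getD_foldl_insert_zero (l : List (String × List Int)) (d : PySem.Dict String Int)
    (k : String) (h : d.getD k 0 = 0) :
    (l.foldl (fun d kv => d.insert kv.1 (0 : Int)) d).getD k 0 = 0 := by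
  induction l generalizing d with
  | nil => exact h
  | cons kv rest ih =>
    apply ih
    rw [PySem.Dict.getD_insert]
    split <;> simp [h]

theorem cov_fold (dict_nums : List (String × List Int)) (nums : List Int) (k : String) :
    ∀ d0 : PySem.Dict String Int,
      (nums.foldl (fun d x => ((fbcs_index dict_nums).getD x []).foldl
          (fun d k => d.modify k 0 (· + 1)) d) d0).getD k 0
        = d0.getD k 0 + (nums.map (fun x => (((fbcs_index dict_nums).getD x []).count k : Int))).sum := by
  induction nums with
  | nil => intro d0; simp
  | cons x rest ih =>
    intro d0
    simp only [List.foldl_cons, List.map_cons, List.sum_cons]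
    rw [ih, PySem.Dict.getD_foldl_modify_add_one]
    omega

theorem fbcs_coverage_getD (dict_nums : List (String × List Int)) (nums : List Int) (k : String) :
    (fbcs_coverage dict_nums nums).getD k 0
      = (nums.map (fun x => (((fbcs_index dict_nums).getD x []).count k : Int))).sum := by
  unfold fbcs_coverage
  rw [cov_fold, getD_foldl_insert_zero _ _ _ (by simp), zero_add]

-- sum of 0/1 indicators = length of the filter
theorem sum_indicator_eq_filter_length (nums : List Int) (v : List Int) :
    (nums.map (fun x => if x ∈ v then (1 : Int) else 0)).sum
      = ((nums.filter (fun x => decide (x ∈ v))).length : Int) := by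
  induction nums with
  | nil => simp
  | cons x rest ih =>
    by_cases hx : x ∈ v
    · simp [hx, ih]
      omega
    · simp [hx, ih]

-- the key fact: B's coverage count equals the length of A's intersection, per dict entry
theorem coverage_eq_inter_length (dict_nums : List (String × List Int)) (nums : List Int)
    (hnums : nums.Nodup) (hkeys : (dict_nums.map Prod.fst).Nodup)
    (k : String) (v : List Int) (hv : v.Nodup) (hmem : (k, v) ∈ dict_nums) :
    (fbcs_coverage dict_nums nums).getD k 0
      = ((PySem.Set.inter (PySem.Set.ofList nums) v).length : Int) := by
  rw [fbcs_coverage_getD]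
  have hcount : ∀ x : Int, ((fbcs_index dict_nums).getD x []).count k = v.count x := by
    intro x
    rw [fbcs_index_count]
    exact sum_blocks_of_nodup dict_nums k v x hkeys hmem
  have hone : ∀ x : Int, (v.count x : Int) = if x ∈ v then (1 : Int) else 0 := by
    intro x
    by_cases hx : x ∈ v
    · simp [hx, List.count_eq_one_of_mem hv hx]
    · simp [hx, List.count_eq_zero_of_not_mem hx]
  have hmap : nums.map (fun x => (((fbcs_index dict_nums).getD x []).count k : Int))
      = nums.map (fun x => if x ∈ v then (1 : Int) else 0) := by
    apply List.map_congr_left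
    intro x _
    rw [hcount x, hone x]
  rw [hmap, sum_indicator_eq_filter_length]
  rw [PySem.Set.ofList_eq_self_of_nodup nums hnums]
  unfold PySem.Set.inter
  simp

-- the two final scans agree, given per-key agreement of the scores
theorem final_scan_eq (dict_nums : List (String × List Int)) (nums : List Int)
    (hnums : nums.Nodup) (hkeys : (dict_nums.map Prod.fst).Nodup)
    (hvals : ∀ kv ∈ dict_nums, (kv.2 : List Int).Nodup) :
    ∀ (l : List (String × List Int)), (∀ kv ∈ l, kv ∈ dict_nums) →
    ∀ (stA : List Int × Option String) (stB : Option String × Int),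
      stB.2 = (stA.1.length : Int) → stB.1 = stA.2 →
      (l.foldl (fun (st : Option String × Int) kv =>
          let c := (fbcs_coverage dict_nums nums).getD kv.1 0
          if c > st.2 then (some kv.1, c) else st) stB).1
        = (l.foldl (fun (st : List Int × Option String) kv =>
            let temp := PySem.Set.inter (PySem.Set.ofList nums) kv.2
            if temp.length > st.1.length then (temp, some kv.1) else st) stA).2
      ∧ (l.foldl (fun (st : Option String × Int) kv =>
          let c := (fbcs_coverage dict_nums nums).getD kv.1 0
          if c > st.2 then (some kv.1, c) else st) stB).2
        = ((l.foldl (fun (st : List Int × Option String) kv =>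
            let temp := PySem.Set.inter (PySem.Set.ofList nums) kv.2
            if temp.length > st.1.length then (temp, some kv.1) else st) stA).1.length : Int) := by
  intro l
  induction l with
  | nil => intro _ stA stB h2 h1; exact ⟨h1, h2⟩
  | cons kv rest ih =>
    intro hsub stA stB h2 h1
    simp only [List.foldl_cons]
    have hmem : kv ∈ dict_nums := hsub kv (List.mem_cons_self ..)
    have hc : (fbcs_coverage dict_nums nums).getD kv.1 0
        = ((PySem.Set.inter (PySem.Set.ofList nums) kv.2).length : Int) :=
      coverage_eq_inter_length dict_nums nums hnums hkeys kv.1 kv.2 (hvals kv hmem) hmem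
    have hiff : ((fbcs_coverage dict_nums nums).getD kv.1 0 > stB.2)
        ↔ ((PySem.Set.inter (PySem.Set.ofList nums) kv.2).length > stA.1.length) := by
      rw [hc, h2]; exact_mod_cast Int.ofNat_lt
    by_cases hgt : (PySem.Set.inter (PySem.Set.ofList nums) kv.2).length > stA.1.length
    · rw [if_pos (hiff.mpr hgt), if_pos hgt]
      exact ih (fun a ha => hsub a (List.mem_cons_of_mem _ ha)) _ _ (by simp [hc]) (by simp)
    · rw [if_neg (fun h => hgt (hiff.mp h)), if_neg hgt]
      exact ih (fun a ha => hsub a (List.mem_cons_of_mem _ ha)) _ _ h2 h1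

-- ===== VERDICT (by name: the statement is the Claim_ definition above) =====
theorem find_best_candidate_set_spec : Claim_equal_find_best_candidate_set := by
  intro dict_nums nums _ hpre
  obtain ⟨hnums, hkeys, hvals⟩ := hpre
  unfold Spec_find_best_candidate_set find_best_candidate_set find_best_candidate_set_alt
  exact ((final_scan_eq dict_nums nums hnums hkeys hvals dict_nums (fun _ h => h)
    ([], none) (none, 0) rfl rfl).1).symm
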